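-- pv_equiv track=rewrite | github.com/SysAdminDoc/SlunderStudio | core/deps.py | _cuda_wheel_tags
-- ===== SOURCE A (Python) =====
-- def _cuda_wheel_tags(cuda_ver: str) -> list[str]:
--     """
--     Given a CUDA version like '12.4', return wheel index tags to try
--     in priority order (exact match first, then nearby).
--     """
--     try:
--         major, minor = cuda_ver.split(".")[:2]
--         major, minor = int(major), int(minor)
--     except (ValueError, IndexError):
--         return ["cu124", "cu121"]
--
--     # Build tag list: exact, then down, then up
--     tags = [f"cu{major}{minor}"]
--     for offset in range(1, 4):
--         if minor - offset >= 0: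
--             tags.append(f"cu{major}{minor - offset}")
--         tags.append(f"cu{major}{minor + offset}")
--     return tags
-- ===== SOURCE B (Python) =====
-- def _cuda_wheel_tags(cuda_ver: str) -> list[str]:
--     parts = cuda_ver.split(".")[:2]
--     if len(parts) < 2:
--         return ["cu124", "cu121"]
--     try:
--         major, minor = int(parts[0]), int(parts[1])
--     except ValueError:
--         return ["cu124", "cu121"]
--     # Stage 1: the candidate minors below (nearest first, never negative) and above.
--     downs = list(range(minor - 1, max(minor - 4, -1), -1))
--     ups = list(range(minor + 1, minor + 4))
--     # Stage 2: round-robin merge, exact minor first.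
--     minors = [minor]
--     while downs or ups:
--         if downs:
--             minors.append(downs.pop(0))
--         if ups:
--             minors.append(ups.pop(0))
--     return [f"cu{major}{m}" for m in minors]
-- ===== Notes on version B (the rewrite author's own statement) =====
-- stated objective: alternative
-- what changed: Instead of one loop that conditionally appends a down-tag and unconditionally an up-tag per offset, B first builds the two candidate-minor sequences as ranges (nearest-first descending, clipped at 0, and ascending) and then round-robin merges them behind the exact minor before formatting.
import Mathlib
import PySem

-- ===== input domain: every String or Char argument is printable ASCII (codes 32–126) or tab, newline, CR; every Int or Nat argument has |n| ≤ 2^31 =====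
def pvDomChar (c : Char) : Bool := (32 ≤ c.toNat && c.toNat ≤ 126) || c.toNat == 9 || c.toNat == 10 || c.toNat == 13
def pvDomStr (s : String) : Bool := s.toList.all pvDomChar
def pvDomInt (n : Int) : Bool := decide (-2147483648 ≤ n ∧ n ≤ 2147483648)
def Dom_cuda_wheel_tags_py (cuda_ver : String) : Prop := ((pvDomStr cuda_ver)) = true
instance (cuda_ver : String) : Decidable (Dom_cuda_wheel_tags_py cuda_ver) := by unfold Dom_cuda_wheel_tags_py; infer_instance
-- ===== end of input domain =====

-- B builds the descending (clipped-at-0) and ascending candidate-minor ranges as two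
-- staged lists and round-robin merges them, instead of A's per-offset conditional loop.

-- ===== PORT A =====
-- `split(".")[:2]` then 2-unpacking: exactly-two-element case succeeds, a shorter
-- list raises ValueError (the fallback branch). `[:2]` = take 2.
def cuda_wheel_tags_py (cuda_ver : String) : List String :=
  match ((PySem.Str.split? cuda_ver ".").getD []).take 2 with
  | [ms, ns] =>
    match PySem.Int.ofStr? ms, PySem.Int.ofStr? ns with
    | some major, some minor =>
        let tags := ["cu" ++ PySem.Int.toStr major ++ PySem.Int.toStr minor]
        (PySem.List.pyRange 1 4 1).foldl (fun tags offset =>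
          (if 0 ≤ minor - offset then
             tags ++ ["cu" ++ PySem.Int.toStr major ++ PySem.Int.toStr (minor - offset)]
           else tags)
          ++ ["cu" ++ PySem.Int.toStr major ++ PySem.Int.toStr (minor + offset)]) tags
    | _, _ => ["cu124", "cu121"]
  | _ => ["cu124", "cu121"]

-- ===== PORT B =====
-- B's while loop: each iteration pops the head of `downs` (if any) then of `ups` (if any).
def pvMergeRR : List Int → List Int → List Int
  | [], [] => []
  | [], u :: us => u :: pvMergeRR [] us
  | d :: ds, [] => d :: pvMergeRR ds []
  | d :: ds, u :: us => d :: u :: pvMergeRR ds us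

-- Source B: length guard first, then the two int() calls under try/except (Option.elim).
def cuda_wheel_tags_py_alt (cuda_ver : String) : List String :=
  let parts := ((PySem.Str.split? cuda_ver ".").getD []).take 2
  if parts.length < 2 then ["cu124", "cu121"]
  else
    (PySem.Int.ofStr? (parts.getD 0 "")).elim ["cu124", "cu121"] (fun major =>
      (PySem.Int.ofStr? (parts.getD 1 "")).elim ["cu124", "cu121"] (fun minor =>
        let downs := PySem.List.pyRange (minor - 1) (max (minor - 4) (-1)) (-1)
        let ups := PySem.List.pyRange (minor + 1) (minor + 4) 1
        (minor :: pvMergeRR downs ups).map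
          (fun m => "cu" ++ PySem.Int.toStr major ++ PySem.Int.toStr m)))

-- ===== PRECONDITION & SPEC =====
def Spec_cuda_wheel_tags_py (cuda_ver : String) (out : List String) : Prop := out = cuda_wheel_tags_py_alt cuda_ver
instance (cuda_ver : String) (out : List String) : Decidable (Spec_cuda_wheel_tags_py cuda_ver out) := by unfold Spec_cuda_wheel_tags_py; infer_instance

-- ===== CLAIM =====
def Claim_equal_cuda_wheel_tags_py : Prop := ∀ (cuda_ver : String), Dom_cuda_wheel_tags_py cuda_ver → Spec_cuda_wheel_tags_py cuda_ver (cuda_wheel_tags_py cuda_ver)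

-- ===== LEMMAS AND PROOFS =====

theorem pv_ups_eq (minor : Int) :
    PySem.List.pyRange (minor + 1) (minor + 4) 1 = [minor + 1, minor + 2, minor + 3] := by
  rw [PySem.List.pyRange_one_cons (by omega), PySem.List.pyRange_one_cons (by omega),
      PySem.List.pyRange_one_cons (by omega), PySem.List.pyRange_one_eq_nil (by omega)]
  simp [show minor + 1 + 1 = minor + 2 by ring, show minor + 2 + 1 = minor + 3 by ring]

theorem pv_downs_eq (minor : Int) :
    PySem.List.pyRange (minor - 1) (max (minor - 4) (-1)) (-1) =
      if 3 ≤ minor then [minor - 1, minor - 2, minor - 3]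
      else if minor = 2 then [1, 0]
      else if minor = 1 then [0]
      else [] := by
  by_cases h3 : 3 ≤ minor
  · rw [if_pos h3, show max (minor - 4) (-1) = minor - 4 by omega,
        PySem.List.pyRange_neg_one_cons (by omega), PySem.List.pyRange_neg_one_cons (by omega),
        PySem.List.pyRange_neg_one_cons (by omega), PySem.List.pyRange_neg_one_eq_nil (by omega)]
    simp [show minor - 1 - 1 = minor - 2 by ring, show minor - 2 - 1 = minor - 3 by ring]
  · rw [if_neg h3]
    by_cases h2 : minor = 2
    · subst h2; decide
    · rw [if_neg h2]
      by_cases h1 : minor = 1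
      · subst h1; decide
      · rw [if_neg h1, PySem.List.pyRange_neg_one_eq_nil (by omega)]

-- core: A's foldl tag-building equals B's merge-then-map for every parsed (major, minor)
theorem pv_tags_eq (major minor : Int) :
    ((PySem.List.pyRange 1 4 1).foldl (fun tags offset =>
        (if 0 ≤ minor - offset then
           tags ++ ["cu" ++ PySem.Int.toStr major ++ PySem.Int.toStr (minor - offset)]
         else tags)
        ++ ["cu" ++ PySem.Int.toStr major ++ PySem.Int.toStr (minor + offset)])
      ["cu" ++ PySem.Int.toStr major ++ PySem.Int.toStr minor]) =
    (minor :: pvMergeRR (PySem.List.pyRange (minor - 1) (max (minor - 4) (-1)) (-1))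
        (PySem.List.pyRange (minor + 1) (minor + 4) 1)).map
      (fun m => "cu" ++ PySem.Int.toStr major ++ PySem.Int.toStr m) := by
  have hr : PySem.List.pyRange 1 4 1 = [1, 2, 3] := by decide
  rw [hr, pv_ups_eq, pv_downs_eq]
  by_cases h3 : 3 ≤ minor
  · simp [h3, pvMergeRR, List.foldl, show (1:Int) ≤ minor by omega,
      show (2:Int) ≤ minor by omega]
  · by_cases h2 : minor = 2
    · subst h2; simp [pvMergeRR, List.foldl]
    · by_cases h1 : minor = 1
      · subst h1; simp [pvMergeRR, List.foldl]
      · simp [h3, h2, h1, pvMergeRR, List.foldl,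
          show ¬ (1:Int) ≤ minor by omega, show ¬ (2:Int) ≤ minor by omega]

-- ===== VERDICT =====
theorem cuda_wheel_tags_py_spec : Claim_equal_cuda_wheel_tags_py := by
  intro cuda_ver _
  unfold Spec_cuda_wheel_tags_py cuda_wheel_tags_py cuda_wheel_tags_py_alt
  cases h : ((PySem.Str.split? cuda_ver ".").getD []).take 2 with
  | nil => simp
  | cons a t =>
    cases t with
    | nil => simp
    | cons b t2 =>
      cases t2 with
      | nil =>
        simp only [List.length_cons, List.length_nil, List.getD_cons_zero, List.getD_cons_succ]
        cases PySem.Int.ofStr? a with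
        | none => simp
        | some major =>
          cases PySem.Int.ofStr? b with
          | none => simp
          | some minor => simpa using pv_tags_eq major minor
      | cons c t3 =>
        exfalso
        have := congrArg List.length h
        simp at this
        omega
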